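-- pv_equiv track=rewrite | github.com/CJavaPython/programmers_solving | heap/더맵게/own_code.py | solution
-- ===== SOURCE A (Python) =====
-- def solution(scoville, K):
--     answer = 0
--     scoville.sort()
--     while True:
--         if len(scoville) <= 1:
--             answer = -1
--             break
--
--         if scoville[0] < K:
--             new_scoville = scoville[0] + (scoville[1] * 2)
--             scoville.pop(0)
--             scoville.pop(0)
--             scoville.append(new_scoville)
--             scoville.sort()
--             answer += 1
--         else:
--             break
--
--     return answer
-- ===== SOURCE B (Python) =====
-- # Two-queue merge: sort once, then each combine is O(1) by merging the sorted
-- # originals with the FIFO of created values (created values are nondecreasing).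
-- # Equivalence is about the return value only: A sorts/pops its argument in place, B does not.
-- def solution(scoville, K):
--     base = sorted(scoville)
--     made = []
--     i = 0
--     j = 0
--     answer = 0
--     while True:
--         if (len(base) - i) + (len(made) - j) <= 1:
--             return -1
--         # peek the overall minimum (fronts of the two sorted queues)
--         if i < len(base) and (j >= len(made) or base[i] <= made[j]):
--             a = base[i]
--         else:
--             a = made[j]
--         if a >= K:
--             return answer
--         # pop the two smallest
--         if i < len(base) and (j >= len(made) or base[i] <= made[j]):
--             i += 1
--         else:
--             j += 1
--         if i < len(base) and (j >= len(made) or base[i] <= made[j]):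
--             b = base[i]
--             i += 1
--         else:
--             b = made[j]
--             j += 1
--         made.append(a + 2 * b)
--         answer += 1
-- ===== Notes on version B (the rewrite author's own statement) =====
-- stated objective: faster
-- what changed: Instead of re-sorting the whole list after every combine, B sorts once and runs a two-queue merge (sorted originals + FIFO of created values, which are provably nondecreasing), so each combine step is O(1).
import Mathlib
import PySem

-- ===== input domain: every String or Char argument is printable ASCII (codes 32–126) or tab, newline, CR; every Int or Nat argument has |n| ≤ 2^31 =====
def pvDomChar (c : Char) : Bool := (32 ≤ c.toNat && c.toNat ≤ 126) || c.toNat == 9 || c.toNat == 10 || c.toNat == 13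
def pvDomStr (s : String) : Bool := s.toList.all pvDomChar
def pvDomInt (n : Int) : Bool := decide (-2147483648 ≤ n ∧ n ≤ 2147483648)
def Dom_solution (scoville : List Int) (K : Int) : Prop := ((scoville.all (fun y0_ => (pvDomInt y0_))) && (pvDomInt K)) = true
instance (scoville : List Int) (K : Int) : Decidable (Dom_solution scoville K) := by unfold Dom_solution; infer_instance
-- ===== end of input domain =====

-- B is faster: it sorts once and does each combine in O(1) via a two-queue merge (created values
-- are nondecreasing), instead of A's re-sort per combine; return-value equivalence only (A mutates its list argument, B does not).

-- ===== PORT A =====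
-- A's loop: while True: if len<=1 -> -1; if s[0] < K combine (pop two fronts, append, re-sort) else stop.
def pvLoopA (K : Int) (s : List Int) (ans : Int) : Int :=
  if s.length ≤ 1 then -1
  else
    match s with
    | s0 :: s1 :: rest =>
      if s0 < K then
        pvLoopA K (PySem.List.sorted (rest ++ [s0 + s1 * 2]) (fun x => x)) (ans + 1)
      else ans
    | _ => -1            -- unreachable: length ≥ 2
termination_by s.length
decreasing_by
  simp_all [PySem.List.length_sorted]

def solution (scoville : List Int) (K : Int) : Int :=
  pvLoopA K (PySem.List.sorted scoville (fun x => x)) 0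

-- ===== PORT B =====
-- the front element of the two queues holding the overall minimum (Python: the peek branch)
def pvFrontMin (p q : List Int) : Int :=
  match p, q with
  | x :: _, [] => x
  | x :: _, y :: _ => if x ≤ y then x else y
  | [], y :: _ => y
  | [], [] => 0          -- unreachable: total length ≥ 2 at every use

-- advancing the index past that minimum (Python: i += 1 / j += 1); the suffixes play the indices' role
def pvPop (p q : List Int) : List Int × List Int :=
  match p, q with
  | _ :: p', [] => (p', [])
  | x :: p', y :: q' => if x ≤ y then (p', y :: q') else (x :: p', q')
  | [], _ :: q' => ([], q')
  | [], [] => ([], [])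

theorem pvPop_length (p q : List Int) (h : 1 ≤ p.length + q.length) :
    (pvPop p q).1.length + (pvPop p q).2.length + 1 = p.length + q.length := by
  rcases p with _ | ⟨x, p'⟩ <;> rcases q with _ | ⟨y, q'⟩ <;> simp_all [pvPop]
  split <;> simp <;> omega

def pvLoopB (K : Int) (p q : List Int) (ans : Int) : Int :=
  if p.length + q.length ≤ 1 then -1
  else
    let a := pvFrontMin p q
    if a < K then
      let r1 := pvPop p q
      let b := pvFrontMin r1.1 r1.2
      let r2 := pvPop r1.1 r1.2
      pvLoopB K r2.1 (r2.2 ++ [a + 2 * b]) (ans + 1)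
    else ans
termination_by p.length + q.length
decreasing_by
  rename_i h _
  have h1 := pvPop_length p q (by omega)
  have h2 := pvPop_length (pvPop p q).1 (pvPop p q).2 (by omega)
  simp only [List.length_append, List.length_cons, List.length_nil]
  omega

def solution_alt (scoville : List Int) (K : Int) : Int :=
  pvLoopB K (PySem.List.sorted scoville (fun x => x)) [] 0

-- ===== PRECONDITION & SPEC =====
def Spec_solution (scoville : List Int) (K : Int) (out : Int) : Prop := out = solution_alt scoville K
instance (scoville : List Int) (K : Int) (out : Int) : Decidable (Spec_solution scoville K out) := by unfold Spec_solution; infer_instance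

-- ===== CLAIM (what is proved, stated in full; the proofs are below) =====
def Claim_equal_solution : Prop := ∀ (scoville : List Int) (K : Int), Dom_solution scoville K → Spec_solution scoville K (solution scoville K)

-- ===== LEMMAS AND PROOFS =====

-- the sorted merge of the two queues: A's current list
def pvMerge : List Int → List Int → List Int
  | [], q => q
  | p, [] => p
  | x :: p, y :: q => if x ≤ y then x :: pvMerge p (y :: q) else y :: pvMerge (x :: p) q
termination_by p q => p.length + q.length

theorem pvMerge_nil_right (p : List Int) : pvMerge p [] = p := by
  cases p <;> simp [pvMerge]

theorem pvMerge_length (p q : List Int) : (pvMerge p q).length = p.length + q.length := by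
  induction p, q using pvMerge.induct with
  | case1 q => simp [pvMerge]
  | case2 => simp [pvMerge_nil_right]
  | case3 x p y q h ih => simp [pvMerge, h, ih]; omega
  | case4 x p y q h ih => simp [pvMerge, h, ih]; omega

theorem pvMerge_perm (p q : List Int) : (pvMerge p q).Perm (p ++ q) := by
  induction p, q using pvMerge.induct with
  | case1 q => simp [pvMerge]
  | case2 => simp [pvMerge_nil_right]
  | case3 x p y q h ih => simpa [pvMerge, h] using ih.cons x
  | case4 x p y q h ih =>
      simp only [pvMerge, if_neg h]
      exact ((ih.cons y).trans (List.Perm.symm (List.perm_middle)))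

theorem pvMerge_pairwise (p q : List Int) (hp : p.Pairwise (· ≤ ·)) (hq : q.Pairwise (· ≤ ·)) :
    (pvMerge p q).Pairwise (· ≤ ·) := by
  induction p, q using pvMerge.induct with
  | case1 q => simpa [pvMerge] using hq
  | case2 => simpa [pvMerge_nil_right] using hp
  | case3 x p y q h ih =>
      rw [List.pairwise_cons] at hp
      simp only [pvMerge, h, if_pos]
      rw [List.pairwise_cons]
      refine ⟨?_, ih hp.2 hq⟩
      intro z hz
      have hz' := (pvMerge_perm p (y :: q)).mem_iff.mp hz
      simp only [List.mem_append, List.mem_cons] at hz'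
      rcases hz' with h1 | h1 | h1
      · exact hp.1 z h1
      · omega
      · have := (List.pairwise_cons.mp hq).1 z h1; omega
  | case4 x p y q h ih =>
      rw [List.pairwise_cons] at hq
      simp only [pvMerge, if_neg h]
      rw [List.pairwise_cons]
      refine ⟨?_, ih hp hq.2⟩
      intro z hz
      have hz' := (pvMerge_perm (x :: p) q).mem_iff.mp hz
      simp only [List.mem_append, List.mem_cons] at hz'
      rcases hz' with (h1 | h1) | h1
      · omega
      · have := (List.pairwise_cons.mp hp).1 z h1; omega
      · exact hq.1 z h1

theorem pvMerge_cons (p q : List Int) (h : 1 ≤ p.length + q.length) :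
    pvMerge p q = pvFrontMin p q :: pvMerge (pvPop p q).1 (pvPop p q).2 := by
  rcases p with _ | ⟨x, p'⟩ <;> rcases q with _ | ⟨y, q'⟩
  · simp at h
  · simp [pvMerge, pvFrontMin, pvPop]
  · simp [pvMerge_nil_right, pvFrontMin, pvPop]
  · by_cases hxy : x ≤ y <;> simp [pvMerge, pvFrontMin, pvPop, hxy]

-- the two queue-suffixes produced by a pop
theorem pvPop_fst_suffix (p q : List Int) : (pvPop p q).1 <:+ p := by
  rcases p with _ | ⟨x, p'⟩ <;> rcases q with _ | ⟨y, q'⟩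
  · exact List.suffix_rfl
  · exact List.suffix_rfl
  · exact List.suffix_cons x p'
  · simp only [pvPop]
    split
    · exact List.suffix_cons x p'
    · exact List.suffix_rfl

theorem pvPop_snd_suffix (p q : List Int) : (pvPop p q).2 <:+ q := by
  rcases p with _ | ⟨x, p'⟩ <;> rcases q with _ | ⟨y, q'⟩
  · exact List.suffix_rfl
  · exact List.suffix_cons y q'
  · exact List.suffix_rfl
  · simp only [pvPop]
    split
    · exact List.suffix_rfl
    · exact List.suffix_cons y q'


-- a popped front that leaves the queue nonempty lies in dropLast of any list the queue is a suffix of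
theorem head_mem_dropLast_of_suffix {x : Int} {t q : List Int}
    (hs : (x :: t) <:+ q) (ht : t ≠ []) : x ∈ q.dropLast := by
  obtain ⟨pre, rfl⟩ := hs
  rcases t with _ | ⟨a, t'⟩
  · exact absurd rfl ht
  · rw [List.dropLast_append_of_ne_nil (by simp)]
    simp

theorem pairwise_le_getLast {q : List Int} {y : Int} (hq : q.Pairwise (· ≤ ·))
    (hy : q.getLast? = some y) : ∀ z ∈ q, z ≤ y := by
  induction q with
  | nil => simp at hy
  | cons a t ih =>
    rcases t with _ | ⟨b, t'⟩
    · simp at hy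
      intro z hz
      simp at hz
      omega
    · rw [List.getLast?_cons_cons] at hy
      rw [List.pairwise_cons] at hq
      intro z hz
      rcases List.mem_cons.mp hz with rfl | hz'
      · have hym : y ∈ b :: t' := by
          have := List.mem_of_getLast? (l := b :: t') (a := y) hy
          exact this
        exact hq.1 y hym
      · exact ih hq.2 hy z hz'

-- the popped minimum comes from one queue's front, the other queue is untouched
theorem pvPop_spec (p q : List Int) (h : 1 ≤ p.length + q.length) :
    (pvFrontMin p q ∈ p ∧ (pvPop p q).1 = p.tail ∧ (pvPop p q).2 = q) ∨
    (∃ t, q = pvFrontMin p q :: t ∧ (pvPop p q).1 = p ∧ (pvPop p q).2 = t) := by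
  rcases p with _ | ⟨x, p'⟩ <;> rcases q with _ | ⟨y, q'⟩
  · simp at h
  · right; exact ⟨q', rfl, rfl, rfl⟩
  · left; simp [pvFrontMin, pvPop]
  · by_cases hxy : x ≤ y
    · left; simp [pvFrontMin, pvPop, hxy]
    · right; exact ⟨q', by simp [pvFrontMin, hxy], by simp [pvPop, hxy], by simp [pvPop, hxy]⟩

-- the loop invariant of B
def pvInv (p q : List Int) : Prop :=
  p.Pairwise (· ≤ ·) ∧ q.Pairwise (· ≤ ·) ∧
    ∀ y, q.getLast? = some y →
      ∃ d, y ≤ 3 * d ∧ (∀ z ∈ p, d ≤ z) ∧ (∀ z ∈ q.dropLast, d ≤ z)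

theorem pvMain (n : ℕ) (p q : List Int) (K ans : Int) (hn : p.length + q.length = n)
    (hinv : pvInv p q) : pvLoopA K (pvMerge p q) ans = pvLoopB K p q ans := by
  induction n using Nat.strong_induction_on generalizing p q ans with
  | _ n ih =>
  by_cases hle : p.length + q.length ≤ 1
  · rw [pvLoopA.eq_def, pvLoopB.eq_def]
    simp [pvMerge_length, hle]
  · -- total ≥ 2: the merged list starts with the two overall minima
    have h1 : 1 ≤ p.length + q.length := by omega
    obtain ⟨hp, hq, hlast⟩ := hinv
    set a := pvFrontMin p q with ha
    set P1 := (pvPop p q).1 with hP1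
    set Q1 := (pvPop p q).2 with hQ1
    have l1 : P1.length + Q1.length + 1 = p.length + q.length := pvPop_length p q h1
    have h2 : 1 ≤ P1.length + Q1.length := by omega
    set b := pvFrontMin P1 Q1 with hb
    set P2 := (pvPop P1 Q1).1 with hP2
    set Q2 := (pvPop P1 Q1).2 with hQ2
    have l2 : P2.length + Q2.length + 1 = P1.length + Q1.length := pvPop_length P1 Q1 h2
    have e1 : pvMerge p q = a :: pvMerge P1 Q1 := pvMerge_cons p q h1
    have e2 : pvMerge P1 Q1 = b :: pvMerge P2 Q2 := pvMerge_cons P1 Q1 h2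
    have hsufP1 : P1 <:+ p := pvPop_fst_suffix p q
    have hsufQ1 : Q1 <:+ q := pvPop_snd_suffix p q
    have hsufP2p : P2 <:+ p := (pvPop_fst_suffix P1 Q1).trans hsufP1
    have hsufQ2q : Q2 <:+ q := (pvPop_snd_suffix P1 Q1).trans hsufQ1
    -- sortedness of the merged list
    have hms : (pvMerge p q).Pairwise (· ≤ ·) := pvMerge_pairwise p q hp hq
    rw [e1, e2] at hms
    have hab : a ≤ b := (List.pairwise_cons.mp hms).1 b (by simp)
    have hbrest : ∀ z ∈ pvMerge P2 Q2, b ≤ z :=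
      (List.pairwise_cons.mp (List.pairwise_cons.mp hms).2).1
    have hbmem : ∀ z, z ∈ P2 ∨ z ∈ Q2 → b ≤ z := by
      intro z hz
      exact hbrest z ((pvMerge_perm P2 Q2).mem_iff.mpr (List.mem_append.mpr hz))
    -- every still-queued created value is at most the new one
    have hQ2new : ∀ z ∈ Q2, z ≤ a + 2 * b := by
      intro z hz
      rcases hQ2ne : Q2 with _ | ⟨w, t⟩
      · simp [hQ2ne] at hz
      · have hqne : q ≠ [] := by
          intro h0
          rw [h0] at hsufQ2q
          simp [hQ2ne, List.suffix_nil] at hsufQ2q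
        obtain ⟨y, hy⟩ := Option.ne_none_iff_exists'.mp (by simpa [List.getLast?_eq_none_iff] using hqne : q.getLast? ≠ none)
        obtain ⟨d, hyd, hdp, hdq⟩ := hlast y hy
        have hzy : z ≤ y := pairwise_le_getLast hq hy z (hsufQ2q.subset (by rw [hQ2ne] at hz ⊢; exact hz))
        -- d ≤ a
        have hda : d ≤ a := by
          rcases pvPop_spec p q h1 with ⟨hmem, _, hq1⟩ | ⟨t1, hqeq, _, hq1⟩
          · exact hdp a hmem
          · have ht1 : Q2 <:+ t1 := by rw [← hq1, ← hQ1]; exact pvPop_snd_suffix P1 Q1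
            have ht1ne : t1 ≠ [] := by
              intro h0; rw [h0] at ht1; simp [hQ2ne, List.suffix_nil] at ht1
            exact hdq a (head_mem_dropLast_of_suffix (by rw [hqeq]) ht1ne)
        -- d ≤ b
        have hdb : d ≤ b := by
          rcases pvPop_spec P1 Q1 h2 with ⟨hmem, _, _⟩ | ⟨t1, hqeq, _, hq2⟩
          · exact hdp b (hsufP1.subset hmem)
          · have ht1ne : t1 ≠ [] := by
              intro h0; rw [h0] at hq2; rw [← hQ2] at hq2; simp [hq2] at hQ2ne
            exact hdq b (head_mem_dropLast_of_suffix (by rw [← hqeq]; exact hsufQ1) ht1ne)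
        omega
    -- the invariant after the combine
    have hinv' : pvInv P2 (Q2 ++ [a + 2 * b]) := by
      refine ⟨hp.sublist hsufP2p.sublist, ?_, ?_⟩
      · rw [List.pairwise_append]
        exact ⟨hq.sublist hsufQ2q.sublist, by simp,
          fun z hz w hw => by simp at hw; subst hw; exact hQ2new z hz⟩
      · intro y hy
        rw [List.getLast?_concat] at hy
        obtain rfl : y = a + 2 * b := by simpa using hy.symm
        refine ⟨b, by omega, fun z hz => hbmem z (Or.inl hz), fun z hz => ?_⟩
        rw [List.dropLast_concat] at hz
        exact hbmem z (Or.inr hz)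
    -- one step of each loop
    rw [pvLoopA.eq_def, pvLoopB.eq_def]
    rw [e1, e2]
    have hlen : ¬ ((a :: b :: pvMerge P2 Q2).length ≤ 1) := by simp
    simp only [hlen, if_false, hle, if_false, ← ha]
    by_cases haK : a < K
    · simp only [haK, if_true]
      have hsor : PySem.List.sorted (pvMerge P2 Q2 ++ [a + b * 2]) (fun x => x)
          = pvMerge P2 (Q2 ++ [a + 2 * b]) := by
        have h2b : a + b * 2 = a + 2 * b := by ring
        rw [h2b]
        refine PySem.List.sorted_id_eq_of_perm_of_pairwise _ _ ?_ ?_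
        · refine ((pvMerge_perm P2 (Q2 ++ [a + 2 * b])).trans ?_)
          rw [← List.append_assoc]
          exact ((pvMerge_perm P2 Q2).symm.append_right _)
        · exact pvMerge_pairwise _ _ hinv'.1 hinv'.2.1
      rw [hsor]
      exact ih (P2.length + (Q2 ++ [a + 2 * b]).length) (by simp; omega) P2 _ (ans + 1) rfl hinv'
    · simp [haK]

-- ===== VERDICT (by name: the statement is the Claim_ definition above) =====
theorem solution_spec : Claim_equal_solution := by
  intro scoville K _
  unfold Spec_solution solution solution_alt
  have h := pvMain (PySem.List.sorted scoville (fun x => x)).length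
      (PySem.List.sorted scoville (fun x => x)) [] K 0 (by simp)
      ⟨by simpa using PySem.List.sorted_pairwise scoville (fun x => x), by simp, by simp⟩
  rw [← h, pvMerge_nil_right]
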